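-- pv_equiv track=rewrite | github.com/Creeper0809/CUHAbot | scripts/check_fixed_csv.py | count_commas_in_line
-- ===== SOURCE A (Python) =====
-- def count_commas_in_line(line):
--     """라인의 실제 필드 구분자 쉼표 개수 세기 (따옴표 안의 쉼표는 제외)"""
--     in_quotes = False
--     comma_count = 0
--
--     for char in line:
--         if char == '"':
--             in_quotes = not in_quotes
--         elif char == ',' and not in_quotes:
--             comma_count += 1
--
--     return comma_count
-- ===== SOURCE B (Python) =====
-- def count_commas_in_line(line):
--     """라인의 실제 필드 구분자 쉼표 개수 세기 (따옴표 안의 쉼표는 제외)"""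
--     return sum(part.count(',')
--                for i, part in enumerate(line.split('"'))
--                if i % 2 == 0)
-- ===== Notes on version B (the rewrite author's own statement) =====
-- stated objective: faster
-- what changed: Replaces the explicit char-by-char quote-toggling state machine with a split on the double-quote character (segments at even indices lie outside quotes) and a one-line sum of comma counts over those segments, pushing the scan into C-level str.split/str.count.
import Mathlib
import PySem

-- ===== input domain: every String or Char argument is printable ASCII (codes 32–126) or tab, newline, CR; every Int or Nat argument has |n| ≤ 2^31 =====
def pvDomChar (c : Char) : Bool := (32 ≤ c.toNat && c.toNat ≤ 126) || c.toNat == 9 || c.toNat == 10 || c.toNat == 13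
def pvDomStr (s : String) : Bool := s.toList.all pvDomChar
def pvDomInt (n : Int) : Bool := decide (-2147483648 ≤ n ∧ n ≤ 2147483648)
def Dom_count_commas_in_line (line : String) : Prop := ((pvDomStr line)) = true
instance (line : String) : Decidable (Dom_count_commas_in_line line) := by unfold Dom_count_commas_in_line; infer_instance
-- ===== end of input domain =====

-- B replaces A's char-by-char quote-toggling loop with split-on-'"' and a sum of
-- comma counts over the even-indexed (outside-quote) segments (same O(n), measured faster by constant factor).

-- ===== PORT A =====
def count_commas_in_line (line : String) : Int :=
  (line.toList.foldl
    (fun (st : Bool × Int) (c : Char) =>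
      if c = '"' then (!st.1, st.2)
      else if c = ',' ∧ st.1 = false then (st.1, st.2 + 1)
      else st)
    ((false : Bool), (0 : Int))).2

-- ===== PORT B =====
def count_commas_in_line_alt (line : String) : Int :=
  (((PySem.List.enumerate ((PySem.Str.split? line "\"").getD []) 0).filter
      (fun ip => PySem.Int.mod ip.1 2 == 0)).map
    (fun ip => (PySem.Str.count ip.2 "," : Int))).sum

-- ===== PRECONDITION & SPEC =====
def Spec_count_commas_in_line (line : String) (out : Int) : Prop := out = count_commas_in_line_alt line
instance (line : String) (out : Int) : Decidable (Spec_count_commas_in_line line out) := by unfold Spec_count_commas_in_line; infer_instance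

-- ===== CLAIM (what is proved, stated in full; the proofs are below) =====
def Claim_equal_count_commas_in_line : Prop := ∀ (line : String), Dom_count_commas_in_line line → Spec_count_commas_in_line line (count_commas_in_line line)

-- ===== LEMMAS AND PROOFS =====

/-- Structural model of `line.split('"')` (split on the single char `"`). -/
def mySplit : List Char → List (List Char)
  | [] => [[]]
  | c :: cs =>
    if c = '"' then [] :: mySplit cs
    else
      match mySplit cs with
      | [] => [[c]]
      | h :: t => (c :: h) :: t

theorem mySplit_ne_nil (cs : List Char) : mySplit cs ≠ [] := by
  cases cs with
  | nil => simp [mySplit]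
  | cons c cs =>
    simp only [mySplit]
    split_ifs
    · simp
    · cases h : mySplit cs <;> simp

/-- Commas in alternating segments: `q = true` means the current segment is inside quotes. -/
def altSum : Bool → List (List Char) → Int
  | _, [] => 0
  | q, h :: t => (if q then 0 else (h.count ',' : Int)) + altSum (!q) t

theorem count_go_spec (l : List Char) : ∀ (fuel acc : Nat), l.length ≤ fuel →
    PySem.Chars.count.go [','] fuel l acc = acc + l.count ',' := by
  induction l with
  | nil =>
    intro fuel acc _
    cases fuel <;> simp [PySem.Chars.count.go]
  | cons c cs ih =>
    intro fuel acc h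
    cases fuel with
    | zero => simp at h
    | succ fuel =>
      simp only [PySem.Chars.count.go]
      by_cases hc : c = ','
      · subst hc
        simp only [List.isPrefixOf, BEq.rfl, Bool.true_and,
          if_true, List.length, List.drop]
        rw [ih fuel (acc + 1) (by simpa using h)]
        simp only [List.count_cons, BEq.rfl, if_true]
        omega
      · have hpre : List.isPrefixOf [','] (c :: cs) = false := by
          simp only [List.isPrefixOf, Bool.and_true]
          exact beq_eq_false_iff_ne.mpr (fun hh => hc hh.symm)
        simp only [hpre, Bool.false_eq_true, if_false]
        rw [ih fuel acc (by simpa using h)]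
        simp only [List.count_cons]
        rw [if_neg (by exact fun hh => hc (by simpa using hh))]
        omega

theorem chars_count_comma (l : List Char) : PySem.Chars.count l [','] = l.count ',' := by
  simp only [PySem.Chars.count, List.isEmpty_cons, Bool.false_eq_true, if_false]
  simpa using count_go_spec l l.length 0 le_rfl

theorem split_go_spec (l : List Char) : ∀ (fuel : Nat) (cur : List Char) (acc : List (List Char)),
    l.length ≤ fuel →
    PySem.Chars.splitOn.go ['"'] fuel l cur acc =
      acc.reverse ++ (match mySplit l with
        | [] => []
        | h :: t => (cur.reverse ++ h) :: t) := by
  induction l with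
  | nil =>
    intro fuel cur acc _
    cases fuel <;> simp [PySem.Chars.splitOn.go, mySplit]
  | cons c cs ih =>
    intro fuel cur acc h
    obtain ⟨h0, t0, hms⟩ : ∃ h0 t0, mySplit cs = h0 :: t0 := by
      cases hms : mySplit cs with
      | nil => exact absurd hms (mySplit_ne_nil cs)
      | cons a b => exact ⟨a, b, rfl⟩
    cases fuel with
    | zero => simp at h
    | succ fuel =>
      simp only [PySem.Chars.splitOn.go]
      by_cases hc : c = '"'
      · subst hc
        have hsplit : mySplit ('"' :: cs) = [] :: mySplit cs := by
          simp [mySplit]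
        simp only [List.isPrefixOf, BEq.rfl, Bool.true_and,
          if_true, List.length, List.drop]
        rw [ih fuel [] (cur.reverse :: acc) (by simpa using h)]
        rw [hsplit, hms]
        simp
      · have hsplit : mySplit (c :: cs) = (c :: h0) :: t0 := by
          simp [mySplit, hc, hms]
        have hpre : List.isPrefixOf ['"'] (c :: cs) = false := by
          simp only [List.isPrefixOf, Bool.and_true]
          exact beq_eq_false_iff_ne.mpr (fun hh => hc hh.symm)
        simp only [hpre, Bool.false_eq_true, if_false]
        rw [ih fuel (c :: cur) acc (by simpa using h)]
        rw [hsplit, hms]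
        simp

theorem splitOn_eq (cs : List Char) : PySem.Chars.splitOn cs ['"'] = mySplit cs := by
  rw [PySem.Chars.splitOn]
  rw [split_go_spec cs (cs.length + 1) [] [] (by omega)]
  cases hms : mySplit cs with
  | nil => exact absurd hms (mySplit_ne_nil cs)
  | cons h t => simp

theorem fold_spec (cs : List Char) : ∀ (q : Bool) (n : Int),
    (cs.foldl
      (fun (st : Bool × Int) (c : Char) =>
        if c = '"' then (!st.1, st.2)
        else if c = ',' ∧ st.1 = false then (st.1, st.2 + 1)
        else st)
      (q, n)).2 = n + altSum q (mySplit cs) := by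
  induction cs with
  | nil => intro q n; simp [mySplit, altSum]
  | cons c cs ih =>
    intro q n
    obtain ⟨h0, t0, hms⟩ : ∃ h0 t0, mySplit cs = h0 :: t0 := by
      cases hms : mySplit cs with
      | nil => exact absurd hms (mySplit_ne_nil cs)
      | cons a b => exact ⟨a, b, rfl⟩
    by_cases hc : c = '"'
    · subst hc
      rw [List.foldl_cons, if_pos rfl]
      rw [show mySplit ('"' :: cs) = [] :: mySplit cs from by simp [mySplit]]
      rw [show altSum q ([] :: mySplit cs) = 0 + altSum (!q) (mySplit cs) from by
        cases q <;> simp [altSum]]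
      rw [show (0 : Int) + altSum (!q) (mySplit cs) = altSum (!q) (mySplit cs) from by omega]
      exact ih (!q) n
    · have hsplit : mySplit (c :: cs) = (c :: h0) :: t0 := by
        simp [mySplit, hc, hms]
      by_cases hq : q = false
      · subst hq
        by_cases hcm : c = ','
        · subst hcm
          rw [List.foldl_cons, if_neg hc,
            if_pos (⟨rfl, rfl⟩ : (',' : Char) = ',' ∧ ((false : Bool), n).1 = false)]
          have h2 : (List.foldl
              (fun (st : Bool × Int) (c : Char) =>
                if c = '"' then (!st.1, st.2)
                else if c = ',' ∧ st.1 = false then (st.1, st.2 + 1)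
                else st)
              (((false : Bool), n).1, ((false : Bool), n).2 + 1) cs).2
              = n + 1 + altSum false (mySplit cs) := ih false (n + 1)
          rw [h2, hsplit, hms]
          simp [altSum]
          all_goals omega
        · rw [List.foldl_cons, if_neg hc,
            if_neg (show ¬(c = ',' ∧ ((false : Bool), n).1 = false) from by simp [hcm])]
          rw [ih false n, hsplit, hms]
          have hbeq2 : (c == ',') = false := beq_eq_false_iff_ne.mpr hcm
          have hcnt : List.count ',' (c :: h0) = List.count ',' h0 := by
            simp [List.count_cons, hbeq2]
          simp [altSum, hcnt]
      · have hq' : q = true := by cases q <;> simp_all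
        subst hq'
        rw [List.foldl_cons, if_neg hc,
          if_neg (show ¬(c = ',' ∧ ((true : Bool), n).1 = false) from by simp)]
        rw [ih true n, hsplit, hms]
        simp [altSum]

theorem enum_spec (L : List (List Char)) : ∀ (k : Int),
    (((PySem.List.enumerate (L.map String.ofList) k).filter
        (fun ip => PySem.Int.mod ip.1 2 == 0)).map
      (fun ip => (PySem.Str.count ip.2 "," : Int))).sum
    = altSum (!(PySem.Int.mod k 2 == 0)) L := by
  induction L with
  | nil => intro k; simp [PySem.List.enumerate_nil, altSum]
  | cons h t ih =>
    intro k
    have hmod : PySem.Int.mod k 2 = k % 2 := PySem.Int.mod_eq_emod_of_pos (by omega)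
    have hmod1 : PySem.Int.mod (k + 1) 2 = (k + 1) % 2 := PySem.Int.mod_eq_emod_of_pos (by omega)
    have hcomma : ("," : String).toList = [','] := by decide
    have hcount : (PySem.Str.count (String.ofList h) "," : Int) = (h.count ',' : Int) := by
      rw [PySem.Str.count, String.toList_ofList, hcomma, chars_count_comma h]
    simp only [List.map_cons, PySem.List.enumerate_cons]
    by_cases hk : PySem.Int.mod k 2 = 0
    · have hb : (PySem.Int.mod k 2 == 0) = true := by rw [hk]; rfl
      have hb1 : (PySem.Int.mod (k + 1) 2 == 0) = false := by
        simp only [beq_eq_false_iff_ne, ne_eq, hmod1]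
        rw [hmod] at hk
        omega
      simp only [List.filter_cons, hb, if_true, List.map_cons, List.sum_cons]
      rw [ih (k + 1), hb1]
      simp [altSum, chars_count_comma]
    · have hb : (PySem.Int.mod k 2 == 0) = false := by
        simp only [beq_eq_false_iff_ne, ne_eq]
        exact hk
      have hb1 : (PySem.Int.mod (k + 1) 2 == 0) = true := by
        simp only [beq_iff_eq, hmod1]
        rw [hmod] at hk
        omega
      simp only [List.filter_cons, hb, Bool.false_eq_true, if_false]
      rw [ih (k + 1), hb1]
      simp [altSum]

-- ===== VERDICT (by name: the statement is the Claim_ definition above) =====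
theorem count_commas_in_line_spec : Claim_equal_count_commas_in_line := by
  intro line _
  unfold Spec_count_commas_in_line count_commas_in_line count_commas_in_line_alt
  rw [fold_spec line.toList false 0]
  have hsep : ("\"" : String).toList = ['"'] := by decide
  have hsplit : PySem.Str.split? line "\"" =
      some ((mySplit line.toList).map String.ofList) := by
    simp only [PySem.Str.split?, PySem.Chars.split?, hsep, List.isEmpty_cons,
      Bool.false_eq_true, if_false, splitOn_eq, Option.map_some]
  rw [hsplit]
  simp only [Option.getD_some]
  rw [enum_spec (mySplit line.toList) 0]
  have h0 : (!(PySem.Int.mod 0 2 == 0)) = false := by decide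
  rw [h0, zero_add]
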